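-- pv_equiv track=rewrite | github.com/Mia-99/gbp | ndim_posegraph_contraction.py | generate_duplicate_node_ids
-- ===== SOURCE A (Python) =====
-- from collections import defaultdict
--
-- def generate_duplicate_node_ids(measurements_nodeIDs):
--
--     # Step 1: Count how many times each node appears (this counts the factors for each node)
--     node_factor_count = defaultdict(int)
--     for node1, node2 in measurements_nodeIDs:
--         node_factor_count[node1] += 1
--         node_factor_count[node2] += 1
--
--     # Step 2: Generate unique duplicate node IDs
--     duplicate_node_ids = {}
--     unique_id_counter = defaultdict(int)  # To ensure uniqueness of the generated duplicate IDs
--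
--     for node_id, count in node_factor_count.items():
--         for i in range(count):
--             # Generate a new unique duplicate for each factor (node ID)
--             # duplicate_id = f"{node_id}_{unique_id_counter[node_id]}"
--             duplicate_id = unique_id_counter[node_id] + node_id * 1000
--             if node_id not in duplicate_node_ids:
--                 duplicate_node_ids[node_id] = [duplicate_id]
--             else:
--                 duplicate_node_ids[node_id].append(duplicate_id)
--             unique_id_counter[node_id] += 1
--
--     return duplicate_node_ids
-- ===== SOURCE B (Python) =====
-- def generate_duplicate_node_ids(measurements_nodeIDs):
--     # Single pass: emit each duplicate ID as the node is encountered, instead of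
--     # building a full count table first and then looping range(count) per node.
--     duplicate_node_ids = {}
--     for node1, node2 in measurements_nodeIDs:
--         for node in (node1, node2):
--             ids = duplicate_node_ids.setdefault(node, [])
--             ids.append(node * 1000 + len(ids))
--     return duplicate_node_ids
-- ===== Notes on version B (the rewrite author's own statement) =====
-- stated objective: alternative
-- what changed: Replaces A's two-phase scheme (count all factor occurrences into a table, then loop range(count) per node) with a single pass that emits node*1000+len(seen-so-far) for each node occurrence as it scans the pairs.
import Mathlib
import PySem

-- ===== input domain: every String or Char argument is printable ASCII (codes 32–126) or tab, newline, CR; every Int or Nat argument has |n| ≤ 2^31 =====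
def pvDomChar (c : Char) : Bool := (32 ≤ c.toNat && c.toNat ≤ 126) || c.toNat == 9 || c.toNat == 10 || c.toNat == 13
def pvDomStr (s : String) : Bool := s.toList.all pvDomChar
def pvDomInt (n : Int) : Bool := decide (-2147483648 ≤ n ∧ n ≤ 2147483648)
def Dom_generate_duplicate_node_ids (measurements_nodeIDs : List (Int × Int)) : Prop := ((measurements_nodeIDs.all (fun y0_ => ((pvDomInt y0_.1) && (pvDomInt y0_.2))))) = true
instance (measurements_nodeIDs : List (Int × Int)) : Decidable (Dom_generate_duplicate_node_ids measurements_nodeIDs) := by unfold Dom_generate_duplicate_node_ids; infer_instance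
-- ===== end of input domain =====

-- B replaces A's two-phase count-then-emit scheme with a single pass that emits each
-- duplicate ID as the node occurrence is scanned (objective: alternative decomposition).

-- ===== PORT A =====
-- inner loop body of A's step 2: one iteration of `for i in range(count)` at node n.
-- (the defaultdict access `unique_id_counter[node_id]` is a lookup-with-default here; its
-- side effect of inserting the key with value 0 does not change any later lookup or the result)
def pvInnerA (n : Int) (s : PySem.Dict Int (List Int) × PySem.Dict Int Int) (_i : Int) :
    PySem.Dict Int (List Int) × PySem.Dict Int Int :=
  let dup := s.2.getD n 0 + n * 1000
  (if s.1.contains n = false then s.1.insert n [dup]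
   else s.1.modify n [] (fun l => l ++ [dup]),
   s.2.modify n 0 (fun x => x + 1))

def generate_duplicate_node_ids (measurements_nodeIDs : List (Int × Int)) : List (Int × List Int) :=
  let node_factor_count : PySem.Dict Int Int :=
    measurements_nodeIDs.foldl
      (fun d p => (d.modify p.1 0 (fun x => x + 1)).modify p.2 0 (fun x => x + 1))
      PySem.Dict.empty
  let s :=
    node_factor_count.items.foldl
      (fun s p => (PySem.List.pyRange 0 p.2 1).foldl (pvInnerA p.1) s)
      (PySem.Dict.empty, PySem.Dict.empty)
  s.1.items

-- ===== PORT B =====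
-- one occurrence of a node: append node*1000 + len(ids) to its list (ids = setdefault(n, []))
def pvStepB (d : PySem.Dict Int (List Int)) (n : Int) : PySem.Dict Int (List Int) :=
  d.modify n [] (fun ids => ids ++ [n * 1000 + (ids.length : Int)])

def generate_duplicate_node_ids_alt (measurements_nodeIDs : List (Int × Int)) : List (Int × List Int) :=
  (measurements_nodeIDs.foldl (fun d p => [p.1, p.2].foldl pvStepB d) PySem.Dict.empty).items

-- ===== PRECONDITION & SPEC =====
def Spec_generate_duplicate_node_ids (measurements_nodeIDs : List (Int × Int)) (out : List (Int × List Int)) : Prop := out = generate_duplicate_node_ids_alt measurements_nodeIDs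
instance (measurements_nodeIDs : List (Int × Int)) (out : List (Int × List Int)) : Decidable (Spec_generate_duplicate_node_ids measurements_nodeIDs out) := by unfold Spec_generate_duplicate_node_ids; infer_instance

-- ===== CLAIM (what is proved, stated in full; the proofs are below) =====
def Claim_equal_generate_duplicate_node_ids : Prop := ∀ (measurements_nodeIDs : List (Int × Int)), Dom_generate_duplicate_node_ids measurements_nodeIDs → Spec_generate_duplicate_node_ids measurements_nodeIDs (generate_duplicate_node_ids measurements_nodeIDs)

-- ===== LEMMAS AND PROOFS =====

-- the common value: the ID list a node with c occurrences ends up with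
def pvSpecIds (k : Int) (c : Nat) : List Int := (List.range c).map (fun i => k * 1000 + (i : Int))

-- the flattened occurrence stream (node1, node2 of each pair in order)
def pvFlat (ms : List (Int × Int)) : List Int := ms.flatMap (fun p => [p.1, p.2])

theorem pv_foldl_pairs {σ : Type} (g : σ → Int → σ) (ms : List (Int × Int)) (s0 : σ) :
    ms.foldl (fun s p => g (g s p.1) p.2) s0 = (pvFlat ms).foldl g s0 := by
  simp [pvFlat, List.foldl_flatMap, List.foldl]

theorem pvSpecIds_length (k : Int) (c : Nat) : (pvSpecIds k c).length = c := by
  simp [pvSpecIds]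

theorem pvSpecIds_snoc (k : Int) (c : Nat) :
    pvSpecIds k c ++ [k * 1000 + (c : Int)] = pvSpecIds k (c + 1) := by
  simp [pvSpecIds, List.range_succ]

theorem pvB_getD (l : List Int) : ∀ (d : PySem.Dict Int (List Int)) (k : Int) (c : Nat),
    d.getD k [] = pvSpecIds k c →
    (l.foldl pvStepB d).getD k [] = pvSpecIds k (c + l.count k) := by
  induction l with
  | nil => intro d k c h; simpa using h
  | cons x l ih =>
    intro d k c h
    by_cases hk : k = x
    · subst hk
      have h1 : (pvStepB d k).getD k [] = pvSpecIds k (c + 1) := by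
        simp only [pvStepB, PySem.Dict.getD_modify, h, pvSpecIds_length]
        exact pvSpecIds_snoc k c
      rw [List.foldl_cons, ih _ _ _ h1]
      congr 1
      simp
      omega
    · have h1 : (pvStepB d x).getD k [] = d.getD k [] := by
        simp [pvStepB, PySem.Dict.getD_modify, hk]
      rw [List.foldl_cons, ih _ _ _ (h1.trans h)]
      congr 1
      simp [Ne.symm hk]

theorem pvB_keys (ms : List (Int × Int)) :
    (ms.foldl (fun d p => [p.1, p.2].foldl pvStepB d) PySem.Dict.empty).keys
      = PySem.Set.ofList (pvFlat ms) := by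
  have h : ms.foldl (fun d p => [p.1, p.2].foldl pvStepB d) PySem.Dict.empty
      = (pvFlat ms).foldl pvStepB PySem.Dict.empty := pv_foldl_pairs pvStepB ms _
  rw [h]
  have := PySem.Dict.keys_foldl_modify (pvFlat ms) ([] : List Int)
      (fun _ x => fun ids => ids ++ [x * 1000 + (ids.length : Int)]) PySem.Dict.empty
  simpa [pvStepB, PySem.Set.ofList, PySem.Set.update, PySem.Dict.keys_empty] using this

theorem pvInnerA_fst (n : Int) (s : PySem.Dict Int (List Int) × PySem.Dict Int Int) (i : Int) :
    (pvInnerA n s i).1 = s.1.modify n [] (fun l => l ++ [s.2.getD n 0 + n * 1000]) := by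
  by_cases h : s.1.contains n = false
  · simp [pvInnerA, h, PySem.Dict.modify, PySem.Dict.getD_of_not_contains _ _ h]
  · simp [pvInnerA, h]

theorem pv_set_add_mem {s : PySem.Set Int} {n : Int} (h : n ∈ s) : PySem.Set.add s n = s := by
  simp [PySem.Set.add, h]

theorem pv_keys_modify_eq_add (d : PySem.Dict Int (List Int)) (n : Int) (f : List Int → List Int) :
    (d.modify n [] f).keys = PySem.Set.add d.keys n := by
  rw [PySem.Dict.keys_modify]
  by_cases h : d.contains n = true
  · rw [PySem.Dict.keys_insert_of_contains _ _ h,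
      pv_set_add_mem ((PySem.Dict.contains_iff_mem_keys d n).mp h)]
  · rw [PySem.Dict.keys_insert_of_not_contains _ _ (by simpa using h)]
    have hn : n ∉ d.keys := fun hm => h ((PySem.Dict.contains_iff_mem_keys d n).mpr hm)
    simp [PySem.Set.add, hn]

theorem pvA_inner (r : List Int) : ∀ (n : Int) (d : PySem.Dict Int (List Int))
    (uc : PySem.Dict Int Int) (c : Nat),
    uc.getD n 0 = (c : Int) →
    d.getD n [] = pvSpecIds n c →
    (r.foldl (pvInnerA n) (d, uc)).1.getD n [] = pvSpecIds n (c + r.length) ∧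
    (r.foldl (pvInnerA n) (d, uc)).2.getD n 0 = ((c + r.length : Nat) : Int) ∧
    (∀ k, k ≠ n → (r.foldl (pvInnerA n) (d, uc)).1.getD k [] = d.getD k []) ∧
    (∀ k, k ≠ n → (r.foldl (pvInnerA n) (d, uc)).2.getD k 0 = uc.getD k 0) ∧
    (r.foldl (pvInnerA n) (d, uc)).1.keys = (if r = [] then d.keys else PySem.Set.add d.keys n) := by
  induction r with
  | nil => intro n d uc c h1 h2; simp [h1, h2]
  | cons i r ih =>
    intro n d uc c h1 h2
    have hstep : pvInnerA n (d, uc) i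
        = (d.modify n [] (fun l => l ++ [(c : Int) + n * 1000]), uc.modify n 0 (fun x => x + 1)) := by
      refine Prod.ext ?_ rfl
      rw [pvInnerA_fst]; simp [h1]
    have hd1 : (d.modify n [] (fun l => l ++ [(c : Int) + n * 1000])).getD n [] = pvSpecIds n (c + 1) := by
      simp only [PySem.Dict.getD_modify, h2]
      rw [show (c : Int) + n * 1000 = n * 1000 + (c : Int) by ring]
      exact pvSpecIds_snoc n c
    have hu1 : (uc.modify n 0 (fun x => x + 1)).getD n 0 = ((c + 1 : Nat) : Int) := by
      simp only [PySem.Dict.getD_modify, h1]; push_cast; ring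
    obtain ⟨g1, g2, g3, g4, g5⟩ := ih n _ _ (c + 1) hu1 hd1
    rw [List.foldl_cons, hstep]
    refine ⟨?_, ?_, ?_, ?_, ?_⟩
    · rw [g1]; congr 1; simp; omega
    · rw [g2]; congr 1; simp; omega
    · intro k hk
      rw [g3 k hk]
      simp [PySem.Dict.getD_modify, hk]
    · intro k hk
      rw [g4 k hk]
      simp [PySem.Dict.getD_modify, hk]
    · rw [g5, pv_keys_modify_eq_add]
      by_cases hr : r = []
      · simp [hr]
      · simp only [hr, if_false, if_neg (by simp : ¬(i :: r = []))]
        exact pv_set_add_mem (by simp [PySem.Set.add]; by_cases h : n ∈ d.keys <;> simp [h])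

theorem pv_pyRange_len (c : Int) : (PySem.List.pyRange 0 c 1).length = c.toNat := by
  simp [pysem]

theorem pvA_outer (ps : List (Int × Int)) : ∀ (d : PySem.Dict Int (List Int)) (uc : PySem.Dict Int Int),
    (∀ p ∈ ps, p.1 ∉ d.keys) →
    (∀ p ∈ ps, uc.getD p.1 0 = 0) →
    (ps.map Prod.fst).Nodup →
    (∀ p ∈ ps, 0 < p.2) →
    (ps.foldl (fun s p => (PySem.List.pyRange 0 p.2 1).foldl (pvInnerA p.1) s) (d, uc)).1.keys
      = d.keys ++ ps.map Prod.fst ∧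
    (∀ p ∈ ps, (ps.foldl (fun s p => (PySem.List.pyRange 0 p.2 1).foldl (pvInnerA p.1) s) (d, uc)).1.getD p.1 []
      = pvSpecIds p.1 p.2.toNat) ∧
    (∀ k, k ∉ ps.map Prod.fst →
      (ps.foldl (fun s p => (PySem.List.pyRange 0 p.2 1).foldl (pvInnerA p.1) s) (d, uc)).1.getD k []
      = d.getD k []) := by
  induction ps with
  | nil => intro d uc _ _ _ _; simp
  | cons p ps ih =>
    intro d uc hfresh huc hnd hpos
    have hpn : p.1 ∉ d.keys := hfresh p (by simp)
    have hcontains : d.contains p.1 = false := by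
      rw [PySem.Dict.contains_eq_decide_mem_keys]; simp [hpn]
    have hd0 : d.getD p.1 [] = pvSpecIds p.1 0 := by
      rw [PySem.Dict.getD_of_not_contains _ _ hcontains]; simp [pvSpecIds]
    have hu0 : uc.getD p.1 0 = ((0 : Nat) : Int) := by
      simpa using huc p (by simp)
    obtain ⟨i1, _i2, i3, i4, i5⟩ :=
      pvA_inner (PySem.List.pyRange 0 p.2 1) p.1 d uc 0 hu0 hd0
    have hrne : PySem.List.pyRange 0 p.2 1 ≠ [] := by
      intro h
      have := pv_pyRange_len p.2
      rw [h] at this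
      have hp2 := hpos p (by simp)
      simp at this
      omega
    rw [if_neg hrne] at i5
    have hadd : PySem.Set.add d.keys p.1 = d.keys ++ [p.1] := by
      simp [PySem.Set.add, hpn]
    rcases hs1 : (PySem.List.pyRange 0 p.2 1).foldl (pvInnerA p.1) (d, uc) with ⟨d1, u1⟩
    rw [hs1] at i1 i3 i4 i5
    have hnd' : (ps.map Prod.fst).Nodup := (List.nodup_cons.mp (by simpa using hnd)).2
    have hpnotin : p.1 ∉ ps.map Prod.fst := (List.nodup_cons.mp (by simpa using hnd)).1
    have hfresh' : ∀ q ∈ ps, q.1 ∉ d1.keys := by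
      intro q hq
      rw [i5, hadd]
      have hqn : q.1 ≠ p.1 := by
        intro h; exact hpnotin (h ▸ List.mem_map_of_mem hq)
      simp [hqn]
      exact hfresh q (by simp [hq])
    have huc' : ∀ q ∈ ps, u1.getD q.1 0 = 0 := by
      intro q hq
      have hqn : q.1 ≠ p.1 := by
        intro h; exact hpnotin (h ▸ List.mem_map_of_mem hq)
      rw [i4 q.1 hqn]
      exact huc q (by simp [hq])
    obtain ⟨o1, o2, o3⟩ := ih d1 u1 hfresh' huc' hnd' (fun q hq => hpos q (by simp [hq]))
    rw [List.foldl_cons, hs1]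
    refine ⟨?_, ?_, ?_⟩
    · rw [o1, i5, hadd]; simp
    · intro q hq
      rcases List.mem_cons.mp hq with hq | hq
      · subst hq
        rw [o3 q.1 hpnotin, i1, pv_pyRange_len]; simp
      · exact o2 q hq
    · intro k hk
      simp only [List.map_cons, List.mem_cons, not_or] at hk
      obtain ⟨hk1, hk2⟩ := hk
      rw [o3 k hk2, i3 k hk1]

theorem pv_final (ms : List (Int × Int)) :
    generate_duplicate_node_ids ms = generate_duplicate_node_ids_alt ms := by
  unfold generate_duplicate_node_ids generate_duplicate_node_ids_alt
  dsimp only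
  have hcnt : ms.foldl
      (fun d p => (d.modify p.1 0 (fun x => x + 1)).modify p.2 0 (fun x => x + 1))
      PySem.Dict.empty = PySem.Dict.counter (pvFlat ms) := by
    rw [PySem.Dict.counter_eq_foldl]
    exact pv_foldl_pairs (fun (d : PySem.Dict Int Int) x => d.modify x 0 (fun y => y + 1)) ms _
  rw [hcnt]
  have hfst : ((PySem.Dict.counter (pvFlat ms)).items).map Prod.fst
      = PySem.Set.ofList (pvFlat ms) := by
    rw [PySem.Dict.items_counter]
    simp [Function.comp_def]
  obtain ⟨o1, o2, o3⟩ := pvA_outer ((PySem.Dict.counter (pvFlat ms)).items)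
      PySem.Dict.empty PySem.Dict.empty
      (by intro p _; simp [PySem.Dict.keys_empty])
      (by intro p _; simp [PySem.Dict.getD_empty])
      (by rw [hfst]; exact PySem.Set.nodup_ofList _)
      (by
        intro p hp
        rw [PySem.Dict.items_counter] at hp
        obtain ⟨k, hk, rfl⟩ := List.mem_map.mp hp
        have : k ∈ pvFlat ms := (PySem.Set.mem_ofList _ _).mp hk
        have hpos0 : (0 : Int) < ((pvFlat ms).count k : Int) := by
          exact_mod_cast List.count_pos_iff.mpr this
        simpa using hpos0)
  rw [PySem.Dict.keys_empty, List.nil_append, hfst] at o1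
  have hB : ms.foldl (fun d p => [p.1, p.2].foldl pvStepB d) PySem.Dict.empty
      = (pvFlat ms).foldl pvStepB PySem.Dict.empty := pv_foldl_pairs pvStepB ms _
  rw [PySem.Dict.items_eq_map_keys _ (by rw [o1]; exact PySem.Set.nodup_ofList _) ([] : List Int),
    PySem.Dict.items_eq_map_keys _ (by rw [pvB_keys]; exact PySem.Set.nodup_ofList _) ([] : List Int),
    o1, pvB_keys]
  refine List.map_congr_left ?_
  intro k hk
  have hkmem : k ∈ pvFlat ms := (PySem.Set.mem_ofList _ _).mp hk
  have hA : (((PySem.Dict.counter (pvFlat ms)).items).foldl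
        (fun s p => (PySem.List.pyRange 0 p.2 1).foldl (pvInnerA p.1) s)
        (PySem.Dict.empty, PySem.Dict.empty)).1.getD k []
      = pvSpecIds k ((pvFlat ms).count k) := by
    have hp : (k, ((pvFlat ms).count k : Int)) ∈ (PySem.Dict.counter (pvFlat ms)).items := by
      rw [PySem.Dict.items_counter]
      exact List.mem_map_of_mem ((PySem.Set.mem_ofList _ _).mpr hkmem)
    have := o2 _ hp
    simpa using this
  have hBk : (ms.foldl (fun d p => [p.1, p.2].foldl pvStepB d) PySem.Dict.empty).getD k []
      = pvSpecIds k ((pvFlat ms).count k) := by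
    rw [hB]
    have := pvB_getD (pvFlat ms) PySem.Dict.empty k 0 (by simp [PySem.Dict.getD_empty, pvSpecIds])
    simpa using this
  rw [hA, hBk]

-- ===== VERDICT (by name: the statement is the Claim_ definition above) =====
theorem generate_duplicate_node_ids_spec : Claim_equal_generate_duplicate_node_ids := by
  intro ms _hdom
  unfold Spec_generate_duplicate_node_ids
  exact pv_final ms
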